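-- pv_equiv track=rewrite | github.com/TurtleTools/caretta | app.py | protein_to_aln_index
-- ===== SOURCE A (Python) =====
-- def protein_to_aln_index(protein_index, aln_seq):
--     n = 0
--     for i in range(len(aln_seq)):
--         if protein_index == n:
--             return i
--         elif aln_seq[i] == "-":
--             pass
--         else:
--             n += 1
-- ===== SOURCE B (Python) =====
-- def protein_to_aln_index(protein_index, aln_seq):
--     # Prefix table: positions[i] = number of non-gap characters in aln_seq[:i],
--     # then return the first alignment index whose prefix count equals protein_index.
--     positions = []
--     n = 0
--     for ch in aln_seq:
--         positions.append(n)
--         if ch != "-":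
--             n += 1
--     for i, p in enumerate(positions):
--         if p == protein_index:
--             return i
--     return None
-- ===== Notes on version B (the rewrite author's own statement) =====
-- stated objective: alternative
-- what changed: B replaces A's fused counter-and-compare loop with two separate passes: it first builds a prefix table of non-gap counts, then scans that table for the first index whose count equals protein_index.
import Mathlib
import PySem

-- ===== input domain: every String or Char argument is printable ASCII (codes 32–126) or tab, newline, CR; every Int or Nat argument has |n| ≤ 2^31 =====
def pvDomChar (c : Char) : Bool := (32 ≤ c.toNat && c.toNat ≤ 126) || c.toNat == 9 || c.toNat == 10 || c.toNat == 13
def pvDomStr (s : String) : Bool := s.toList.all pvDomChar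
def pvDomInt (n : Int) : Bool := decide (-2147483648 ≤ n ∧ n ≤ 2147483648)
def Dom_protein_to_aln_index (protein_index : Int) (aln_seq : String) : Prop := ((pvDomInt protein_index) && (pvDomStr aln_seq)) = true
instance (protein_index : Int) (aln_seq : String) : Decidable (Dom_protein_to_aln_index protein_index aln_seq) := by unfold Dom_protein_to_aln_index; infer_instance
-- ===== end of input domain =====

-- B replaces A's fused counter-and-compare loop with two passes: build a prefix table of
-- non-gap counts, then scan it for the first index whose count equals protein_index.

-- ===== PORT A =====
-- A's loop over range(len(aln_seq)) with counter n; checks before counting.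
def pvALoop (protein_index : Int) : List Char → Int → Int → Option Int
  | [], _, _ => none
  | c :: rest, i, n =>
    if protein_index == n then some i
    else if c == '-' then pvALoop protein_index rest (i + 1) n
    else pvALoop protein_index rest (i + 1) (n + 1)

def protein_to_aln_index (protein_index : Int) (aln_seq : String) : Option Int :=
  pvALoop protein_index aln_seq.toList 0 0

-- ===== PORT B =====
-- first pass: positions[i] = count of non-gap chars in aln_seq[:i]
def pvPosList : List Char → Int → List Int
  | [], _ => []
  | c :: rest, n => n :: pvPosList rest (if c != '-' then n + 1 else n)

-- second pass: first index i with positions[i] == protein_index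
def pvFindEq (protein_index : Int) : List Int → Int → Option Int
  | [], _ => none
  | p :: rest, i => if p == protein_index then some i else pvFindEq protein_index rest (i + 1)

def protein_to_aln_index_alt (protein_index : Int) (aln_seq : String) : Option Int :=
  pvFindEq protein_index (pvPosList aln_seq.toList 0) 0

-- ===== PRECONDITION & SPEC =====
def Spec_protein_to_aln_index (protein_index : Int) (aln_seq : String) (out : Option Int) : Prop := out = protein_to_aln_index_alt protein_index aln_seq
instance (protein_index : Int) (aln_seq : String) (out : Option Int) : Decidable (Spec_protein_to_aln_index protein_index aln_seq out) := by unfold Spec_protein_to_aln_index; infer_instance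

-- ===== CLAIM (what is proved, stated in full; the proofs are below) =====
def Claim_equal_protein_to_aln_index : Prop := ∀ (protein_index : Int) (aln_seq : String), Dom_protein_to_aln_index protein_index aln_seq → Spec_protein_to_aln_index protein_index aln_seq (protein_to_aln_index protein_index aln_seq)

-- ===== LEMMAS AND PROOFS =====
theorem pvALoop_eq_findEq (t : Int) (l : List Char) :
    ∀ (i n : Int), pvALoop t l i n = pvFindEq t (pvPosList l n) i := by
  induction l with
  | nil => intro i n; rfl
  | cons c rest ih =>
    intro i n
    simp only [pvALoop, pvPosList, pvFindEq]
    by_cases h : t = n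
    · subst h; simp
    · have h1 : (t == n) = false := by simp [h]
      have h2 : (n == t) = false := by simp [beq_iff_eq]; omega
      rw [h1, h2]
      simp only [Bool.false_eq_true, if_false]
      by_cases hc : c = '-'
      · simp [hc, ih]
      · simp [hc, ih]

-- ===== VERDICT (by name: the statement is the Claim_ definition above) =====
theorem protein_to_aln_index_spec : Claim_equal_protein_to_aln_index := by
  intro t s _
  unfold Spec_protein_to_aln_index protein_to_aln_index protein_to_aln_index_alt
  exact pvALoop_eq_findEq t s.toList 0 0
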